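-- pv_equiv track=rewrite | github.com/rnabioco/sracha-rs | validation/mismatch_report.py | classify_record
-- ===== SOURCE A (Python) =====
-- def classify_record(seq_a, seq_b):
--     """Return (class, diff_positions) for one record pair.
--
--     diff_positions is a list of (i, char_a, char_b) for each mismatched index,
--     or None if the record class is IDENTICAL or LENGTH_DIFF (no per-position
--     comparison is valid for length-mismatched reads in this pass).
--     """
--     if seq_a == seq_b:
--         return "IDENTICAL", None
--     if len(seq_a) != len(seq_b):
--         return "LENGTH_DIFF", None
--
--     diffs = [(i, seq_a[i], seq_b[i]) for i in range(len(seq_a)) if seq_a[i] != seq_b[i]]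
--     saw_n_mask = False
--     saw_base_flip = False
--     for _, ca, cb in diffs:
--         if ca == "N" or cb == "N":
--             saw_n_mask = True
--         else:
--             saw_base_flip = True
--         if saw_n_mask and saw_base_flip:
--             break
--     if saw_n_mask and not saw_base_flip:
--         return "N_MASK_ONLY", diffs
--     if saw_base_flip and not saw_n_mask:
--         return "BASE_FLIP", diffs
--     return "MIXED", diffs
-- ===== SOURCE B (Python) =====
-- def classify_record(seq_a, seq_b):
--     """Return (class, diff_positions) for one record pair."""
--     if seq_a == seq_b:
--         return "IDENTICAL", None
--     if len(seq_a) != len(seq_b):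
--         return "LENGTH_DIFF", None
--
--     # Merge string: at every N-involved position take b's char, elsewhere a's char.
--     # merged == seq_b  <=> every mismatch is N-involved; merged == seq_a <=> none is.
--     merged = "".join(cb if (ca == "N" or cb == "N") else ca
--                      for ca, cb in zip(seq_a, seq_b))
--     diffs = [(i, ca, cb) for i, (ca, cb) in enumerate(zip(seq_a, seq_b)) if ca != cb]
--     if merged == seq_b:
--         return "N_MASK_ONLY", diffs
--     if merged == seq_a:
--         return "BASE_FLIP", diffs
--     return "MIXED", diffs
-- ===== Notes on version B (the rewrite author's own statement) =====
-- stated objective: alternative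
-- what changed: Instead of tracking per-mismatch flags with an early-break loop, B builds a merged string (b's char at every N-involved position, a's char elsewhere) and classifies by whole-string equality: merged==seq_b means all mismatches are N-type, merged==seq_a means none are.
import Mathlib
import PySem

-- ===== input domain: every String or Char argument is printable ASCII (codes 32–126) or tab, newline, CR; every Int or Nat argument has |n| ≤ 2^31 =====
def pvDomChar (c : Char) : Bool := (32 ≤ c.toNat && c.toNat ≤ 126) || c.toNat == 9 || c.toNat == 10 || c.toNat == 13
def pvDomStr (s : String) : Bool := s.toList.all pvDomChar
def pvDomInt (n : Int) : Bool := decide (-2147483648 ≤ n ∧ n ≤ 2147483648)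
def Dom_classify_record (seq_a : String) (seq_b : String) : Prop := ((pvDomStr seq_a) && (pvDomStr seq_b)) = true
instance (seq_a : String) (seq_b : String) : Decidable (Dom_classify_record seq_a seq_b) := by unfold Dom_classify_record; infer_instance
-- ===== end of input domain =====

-- B replaces A's per-mismatch flag loop (with early break) by a merged string — b's char at
-- every N-involved position, a's char elsewhere — and classifies by whole-string equality:
-- merged == seq_b means all mismatches are N-type, merged == seq_a means none are
-- (objective: an alternative algorithm of the same O(n) cost).

-- ===== PORT A =====
-- A's diffs comprehension: [(i, seq_a[i], seq_b[i]) for i in range(len(seq_a)) if seq_a[i] != seq_b[i]]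
-- (i is always in range here, so the total pyGetD is exact)
def aDiffs (la lb : List Char) : List (Int × String × String) :=
  (PySem.List.pyRange 0 (la.length : Int) 1).foldl
    (fun acc i =>
      if PySem.List.pyGetD la i ' ' ≠ PySem.List.pyGetD lb i ' ' then
        acc ++ [(i, String.ofList [PySem.List.pyGetD la i ' '], String.ofList [PySem.List.pyGetD lb i ' '])]
      else acc) []

-- A's flag loop over diffs, with the early 'break' once both flags are set
def aFlags : List (Int × String × String) → Bool → Bool → Bool × Bool
  | [], n, f => (n, f)
  | (_, ca, cb) :: rest, n, f =>
    let n' := if ca == "N" || cb == "N" then true else n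
    let f' := if ca == "N" || cb == "N" then f else true
    if n' && f' then (n', f') else aFlags rest n' f'

def classify_record (seq_a : String) (seq_b : String) : String × (Option (List (Int × String × String))) :=
  if seq_a == seq_b then ("IDENTICAL", none)
  else if (seq_a.toList.length : Int) ≠ (seq_b.toList.length : Int) then ("LENGTH_DIFF", none)
  else
    if (aFlags (aDiffs seq_a.toList seq_b.toList) false false).1
        && !(aFlags (aDiffs seq_a.toList seq_b.toList) false false).2 then
      ("N_MASK_ONLY", some (aDiffs seq_a.toList seq_b.toList))
    else if (aFlags (aDiffs seq_a.toList seq_b.toList) false false).2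
        && !(aFlags (aDiffs seq_a.toList seq_b.toList) false false).1 then
      ("BASE_FLIP", some (aDiffs seq_a.toList seq_b.toList))
    else ("MIXED", some (aDiffs seq_a.toList seq_b.toList))

-- ===== PORT B =====
-- B's merged string: ''.join(cb if (ca == 'N' or cb == 'N') else ca for ca, cb in zip(...))
def bMerged (z : List (Char × Char)) : String :=
  String.ofList (z.map (fun p => if p.1 == 'N' || p.2 == 'N' then p.2 else p.1))

-- B's diffs comprehension: [(i, ca, cb) for i, (ca, cb) in enumerate(zip(...)) if ca != cb]
def bDiffs (z : List (Char × Char)) : List (Int × String × String) :=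
  (PySem.List.enumerate z 0).foldl
    (fun acc p =>
      if p.2.1 ≠ p.2.2 then acc ++ [(p.1, String.ofList [p.2.1], String.ofList [p.2.2])] else acc) []

def classify_record_alt (seq_a : String) (seq_b : String) : String × (Option (List (Int × String × String))) :=
  if seq_a == seq_b then ("IDENTICAL", none)
  else if (seq_a.toList.length : Int) ≠ (seq_b.toList.length : Int) then ("LENGTH_DIFF", none)
  else
    if bMerged (seq_a.toList.zip seq_b.toList) == seq_b then
      ("N_MASK_ONLY", some (bDiffs (seq_a.toList.zip seq_b.toList)))
    else if bMerged (seq_a.toList.zip seq_b.toList) == seq_a then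
      ("BASE_FLIP", some (bDiffs (seq_a.toList.zip seq_b.toList)))
    else ("MIXED", some (bDiffs (seq_a.toList.zip seq_b.toList)))

-- ===== PRECONDITION & SPEC =====
def Spec_classify_record (seq_a : String) (seq_b : String) (out : String × (Option (List (Int × String × String)))) : Prop := out = classify_record_alt seq_a seq_b
instance (seq_a : String) (seq_b : String) (out : String × (Option (List (Int × String × String)))) : Decidable (Spec_classify_record seq_a seq_b out) := by unfold Spec_classify_record; infer_instance

-- ===== CLAIM (what is proved, stated in full; the proofs are below) =====
def Claim_equal_classify_record : Prop := ∀ (seq_a : String) (seq_b : String), Dom_classify_record seq_a seq_b → Spec_classify_record seq_a seq_b (classify_record seq_a seq_b)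

-- ===== LEMMAS AND PROOFS =====

-- A's break-loop computes the two 'any' flags
theorem pvAFlagsEq (l : List (Int × String × String)) (n f : Bool) :
    aFlags l n f = (n || l.any (fun q => q.2.1 == "N" || q.2.2 == "N"),
                    f || l.any (fun q => !(q.2.1 == "N" || q.2.2 == "N"))) := by
  induction l generalizing n f with
  | nil => simp [aFlags]
  | cons q l ih =>
      obtain ⟨i, ca, cb⟩ := q
      cases hc : (ca == "N" || cb == "N") <;> cases n <;> cases f <;>
        (simp [aFlags, hc, ih]) <;> simp_all <;> tauto

theorem pvSingleton_eq (c d : Char) : String.ofList [c] = String.ofList [d] ↔ c = d := by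
  constructor
  · intro h
    have := congrArg String.toList h
    simpa using this
  · rintro rfl; rfl

-- A's diffs comprehension equals B's diff-list fold over enumerate(zip(...))
theorem pvDiffsEq (seq_a seq_b : String) (h2' : seq_a.toList.length = seq_b.toList.length) :
    bDiffs (seq_a.toList.zip seq_b.toList) = aDiffs seq_a.toList seq_b.toList := by
  have hzlen : (seq_a.toList.zip seq_b.toList).length = seq_a.toList.length := by
    rw [List.length_zip, ← h2', min_self]
  unfold aDiffs bDiffs
  rw [PySem.List.enumerate_eq_map_pyRange (d := (' ', ' ')), List.foldl_map]
  have hlen : PySem.List.len (seq_a.toList.zip seq_b.toList) = (seq_a.toList.length : Int) := by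
    rw [PySem.List.len_eq, hzlen]
  rw [hlen]
  apply PySem.List.foldl_congr_mem
  intro acc j hj
  obtain ⟨hj0, hjn⟩ := PySem.List.mem_pyRange_one.mp hj
  have hjz : j < (PySem.List.len (seq_a.toList.zip seq_b.toList)) := by
    rw [PySem.List.len_eq, hzlen]; exact hjn
  have hza : j < (PySem.List.len seq_a.toList) := by rw [PySem.List.len_eq]; exact hjn
  have hzb : j < (PySem.List.len seq_b.toList) := by
    rw [PySem.List.len_eq, ← h2']; exact hjn
  rw [PySem.List.pyGetD_eq_getElem _ _ hj0 hjz,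
      PySem.List.pyGetD_eq_getElem _ _ hj0 hza,
      PySem.List.pyGetD_eq_getElem _ _ hj0 hzb]
  simp [List.getElem_zip]

-- append-an-element fold with a Prop test is filter-then-map
theorem pvFoldAppendIte {α β : Type} (p : α → Prop) [DecidablePred p] (f : α → β) (l : List α)
    (acc : List β) :
    l.foldl (fun acc x => if p x then acc ++ [f x] else acc) acc
      = acc ++ (l.filter (fun x => decide (p x))).map f := by
  induction l generalizing acc with
  | nil => simp
  | cons x l ih => by_cases h : p x <;> simp [h, ih]

theorem pvOfListN (c : Char) : (String.ofList [c] == "N") = (c == 'N') := by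
  by_cases h : c = 'N'
  · subst h; decide
  · have h1 : (c == 'N') = false := by simpa using h
    have h2 : String.ofList [c] ≠ "N" := fun hh => h ((pvSingleton_eq c 'N').mp (by rw [hh]))
    rw [h1]
    exact beq_eq_false_iff_ne.mpr h2

-- ===== VERDICT (by name: the statement is the Claim_ definition above) =====
theorem classify_record_spec : Claim_equal_classify_record := by
  intro seq_a seq_b _
  unfold Spec_classify_record classify_record classify_record_alt
  by_cases h1 : (seq_a == seq_b) = true
  · rw [if_pos h1, if_pos h1]
  · rw [if_neg h1, if_neg h1]
    by_cases h2 : ((seq_a.toList.length : Int) ≠ (seq_b.toList.length : Int))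
    · rw [if_pos h2, if_pos h2]
    · rw [if_neg h2, if_neg h2]
      have h2' : seq_a.toList.length = seq_b.toList.length := by
        have := not_not.mp h2; exact_mod_cast this
      have hne : seq_a ≠ seq_b := by simpa using h1
      have hzlen : (seq_a.toList.zip seq_b.toList).length = seq_a.toList.length := by
        rw [List.length_zip, ← h2', min_self]
      have hdiffs := pvDiffsEq seq_a seq_b h2'
      -- shorthand for the zipped list
      set z := seq_a.toList.zip seq_b.toList with hz
      -- B's merged == seq_b ↔ no flip-type mismatch
      have hMB : ((bMerged z == seq_b) = true)
          ↔ ¬(∃ k : Nat, ∃ h : k < z.length, z[k].1 ≠ z[k].2 ∧ ¬(z[k].1 = 'N' ∨ z[k].2 = 'N')) := by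
        rw [beq_iff_eq, ← String.toList_inj]
        unfold bMerged
        rw [String.toList_ofList]
        constructor
        · intro hmap
          rintro ⟨k, hk, hmm, hnn⟩
          have hk' := congrArg (fun l => l[k]?) hmap
          simp only [List.getElem?_map] at hk'
          have hkb : k < seq_b.toList.length := by rw [← h2', ← hzlen]; exact hk
          rw [List.getElem?_eq_getElem hk, List.getElem?_eq_getElem hkb] at hk'
          have hval : (if z[k].1 == 'N' || z[k].2 == 'N' then z[k].2 else z[k].1)
              = seq_b.toList[k] := by simpa using hk'
          have hN : (z[k].1 == 'N' || z[k].2 == 'N') = false := by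
            simp only [Bool.or_eq_false_iff, beq_eq_false_iff_ne]
            exact ⟨fun hh => hnn (Or.inl hh), fun hh => hnn (Or.inr hh)⟩
          rw [hN] at hval
          simp only [Bool.false_eq_true, if_false] at hval
          have hb2 : z[k].2 = seq_b.toList[k] := by
            simp [hz, List.getElem_zip]
          exact hmm (hval.trans hb2.symm)
        · intro hno
          apply List.ext_getElem
          · rw [List.length_map, hzlen, h2']
          · intro k hk1 hk2
            have hkz : k < z.length := by rw [List.length_map] at hk1; exact hk1
            rw [List.getElem_map]
            have hb2 : z[k].2 = seq_b.toList[k] := by simp [hz, List.getElem_zip]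
            by_cases hN : (z[k].1 == 'N' || z[k].2 == 'N') = true
            · rw [if_pos hN]; exact hb2
            · rw [if_neg hN]
              by_cases hmm : z[k].1 = z[k].2
              · exact hmm.trans hb2
              · exact absurd ⟨k, hkz, hmm, fun hh => hN (by
                  rcases hh with hh | hh <;> simp [hh])⟩ hno
      -- B's merged == seq_a ↔ no N-type mismatch
      have hMA : ((bMerged z == seq_a) = true)
          ↔ ¬(∃ k : Nat, ∃ h : k < z.length, z[k].1 ≠ z[k].2 ∧ (z[k].1 = 'N' ∨ z[k].2 = 'N')) := by
        rw [beq_iff_eq, ← String.toList_inj]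
        unfold bMerged
        rw [String.toList_ofList]
        constructor
        · intro hmap
          rintro ⟨k, hk, hmm, hNN⟩
          have hk' := congrArg (fun l => l[k]?) hmap
          simp only [List.getElem?_map] at hk'
          have hka : k < seq_a.toList.length := by rw [← hzlen]; exact hk
          rw [List.getElem?_eq_getElem hk, List.getElem?_eq_getElem hka] at hk'
          have hval : (if z[k].1 == 'N' || z[k].2 == 'N' then z[k].2 else z[k].1)
              = seq_a.toList[k] := by simpa using hk'
          have hN : (z[k].1 == 'N' || z[k].2 == 'N') = true := by
            rcases hNN with hh | hh <;> simp [hh]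
          rw [if_pos hN] at hval
          have ha1 : z[k].1 = seq_a.toList[k] := by simp [hz, List.getElem_zip]
          exact hmm (ha1.trans hval.symm)
        · intro hno
          apply List.ext_getElem
          · rw [List.length_map, hzlen]
          · intro k hk1 hk2
            have hkz : k < z.length := by rw [List.length_map] at hk1; exact hk1
            rw [List.getElem_map]
            have ha1 : z[k].1 = seq_a.toList[k] := by simp [hz, List.getElem_zip]
            by_cases hN : (z[k].1 == 'N' || z[k].2 == 'N') = true
            · rw [if_pos hN]
              by_cases hmm : z[k].1 = z[k].2
              · exact hmm.symm.trans ha1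
              · exact absurd ⟨k, hkz, hmm, by
                  rcases Bool.or_eq_true_iff.mp hN with hh | hh
                  · exact Or.inl (by simpa using hh)
                  · exact Or.inr (by simpa using hh)⟩ hno
            · rw [if_neg hN]; exact ha1
      -- A-side any-flag characterisations
      have hAN : ((aDiffs seq_a.toList seq_b.toList).any (fun q => q.2.1 == "N" || q.2.2 == "N") = true)
          ↔ ∃ k : Nat, ∃ h : k < z.length, z[k].1 ≠ z[k].2 ∧ (z[k].1 = 'N' ∨ z[k].2 = 'N') := by
        rw [← hdiffs]
        unfold bDiffs
        rw [pvFoldAppendIte (fun p : Int × Char × Char => p.2.1 ≠ p.2.2)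
              (fun p => (p.1, String.ofList [p.2.1], String.ofList [p.2.2])) _ []]
        simp only [List.nil_append, List.any_eq_true, List.mem_map, List.mem_filter]
        constructor
        · rintro ⟨r, ⟨q, ⟨hqE, hqm⟩, rfl⟩, hr⟩
          obtain ⟨k, hk, rfl⟩ := (PySem.List.mem_enumerate_iff _ _ _).mp hqE
          refine ⟨k, hk, by simpa using hqm, ?_⟩
          simpa [pvOfListN] using hr
        · rintro ⟨k, hk, hm, hcond⟩
          refine ⟨(((0 : Int) + (k : Int), z[k]).1,
                   String.ofList [(((0 : Int) + (k : Int), z[k]) : Int × Char × Char).2.1],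
                   String.ofList [(((0 : Int) + (k : Int), z[k]) : Int × Char × Char).2.2]),
                  ⟨((0 : Int) + (k : Int), z[k]),
                   ⟨(PySem.List.mem_enumerate_iff _ _ _).mpr ⟨k, hk, rfl⟩, by simpa using hm⟩, rfl⟩, ?_⟩
          simpa [pvOfListN] using hcond
      have hAF : ((aDiffs seq_a.toList seq_b.toList).any (fun q => !(q.2.1 == "N" || q.2.2 == "N")) = true)
          ↔ ∃ k : Nat, ∃ h : k < z.length, z[k].1 ≠ z[k].2 ∧ ¬(z[k].1 = 'N' ∨ z[k].2 = 'N') := by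
        rw [← hdiffs]
        unfold bDiffs
        rw [pvFoldAppendIte (fun p : Int × Char × Char => p.2.1 ≠ p.2.2)
              (fun p => (p.1, String.ofList [p.2.1], String.ofList [p.2.2])) _ []]
        simp only [List.nil_append, List.any_eq_true, List.mem_map, List.mem_filter]
        constructor
        · rintro ⟨r, ⟨q, ⟨hqE, hqm⟩, rfl⟩, hr⟩
          obtain ⟨k, hk, rfl⟩ := (PySem.List.mem_enumerate_iff _ _ _).mp hqE
          refine ⟨k, hk, by simpa using hqm, ?_⟩
          simpa [pvOfListN] using hr
        · rintro ⟨k, hk, hm, hcond⟩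
          refine ⟨(((0 : Int) + (k : Int), z[k]).1,
                   String.ofList [(((0 : Int) + (k : Int), z[k]) : Int × Char × Char).2.1],
                   String.ofList [(((0 : Int) + (k : Int), z[k]) : Int × Char × Char).2.2]),
                  ⟨((0 : Int) + (k : Int), z[k]),
                   ⟨(PySem.List.mem_enumerate_iff _ _ _).mpr ⟨k, hk, rfl⟩, by simpa using hm⟩, rfl⟩, ?_⟩
          simpa [pvOfListN] using hcond
      -- seq_a ≠ seq_b with equal lengths gives some mismatch
      have hsome : (∃ k : Nat, ∃ h : k < z.length, z[k].1 ≠ z[k].2 ∧ (z[k].1 = 'N' ∨ z[k].2 = 'N'))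
          ∨ (∃ k : Nat, ∃ h : k < z.length, z[k].1 ≠ z[k].2 ∧ ¬(z[k].1 = 'N' ∨ z[k].2 = 'N')) := by
        by_contra hcon
        rw [not_or] at hcon
        obtain ⟨hc1, hc2⟩ := hcon
        apply hne
        apply String.toList_inj.mp
        apply List.ext_getElem h2'
        intro k hk1 hk2
        have hkz : k < z.length := by rw [hzlen]; exact hk1
        have ha1 : z[k].1 = seq_a.toList[k] := by simp [hz, List.getElem_zip]
        have hb2 : z[k].2 = seq_b.toList[k] := by simp [hz, List.getElem_zip]
        by_cases hmm : z[k].1 = z[k].2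
        · rw [← ha1, hmm, hb2]
        · by_cases hNN : (z[k].1 = 'N' ∨ z[k].2 = 'N')
          · exact absurd ⟨k, hkz, hmm, hNN⟩ hc1
          · exact absurd ⟨k, hkz, hmm, hNN⟩ hc2
      rw [pvAFlagsEq]
      simp only [Bool.false_or]
      by_cases hpn : (∃ k : Nat, ∃ h : k < z.length, z[k].1 ≠ z[k].2 ∧ (z[k].1 = 'N' ∨ z[k].2 = 'N'))
        <;> by_cases hpf : (∃ k : Nat, ∃ h : k < z.length, z[k].1 ≠ z[k].2 ∧ ¬(z[k].1 = 'N' ∨ z[k].2 = 'N'))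
      · -- MIXED
        have e1 := hAN.mpr hpn
        have e2 := hAF.mpr hpf
        have g1 : (bMerged z == seq_b) = false := by
          rw [Bool.eq_false_iff]; intro hh; exact (hMB.mp hh) hpf
        have g2 : (bMerged z == seq_a) = false := by
          rw [Bool.eq_false_iff]; intro hh; exact (hMA.mp hh) hpn
        rw [e1, e2, g1, g2, hdiffs]
        simp
      · -- N_MASK_ONLY
        have e1 := hAN.mpr hpn
        have e2 : (aDiffs seq_a.toList seq_b.toList).any (fun q => !(q.2.1 == "N" || q.2.2 == "N")) = false := by
          rw [Bool.eq_false_iff]; intro hh; exact hpf (hAF.mp hh)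
        have g1 : (bMerged z == seq_b) = true := hMB.mpr hpf
        rw [e1, e2, g1, hdiffs]
        simp
      · -- BASE_FLIP
        have e1 : (aDiffs seq_a.toList seq_b.toList).any (fun q => q.2.1 == "N" || q.2.2 == "N") = false := by
          rw [Bool.eq_false_iff]; intro hh; exact hpn (hAN.mp hh)
        have e2 := hAF.mpr hpf
        have g1 : (bMerged z == seq_b) = false := by
          rw [Bool.eq_false_iff]; intro hh; exact (hMB.mp hh) hpf
        have g2 : (bMerged z == seq_a) = true := hMA.mpr hpn
        rw [e1, e2, g1, g2, hdiffs]
        simp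
      · exact absurd hsome (by rw [not_or]; exact ⟨hpn, hpf⟩)
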